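-- pv_equiv track=rewrite | github.com/openquantumhardware/qick-tools | zcu111/mkids_2x2_v1/pynq/mkids.py | port2dac
-- ===== SOURCE A (Python) =====
-- def port2dac(port):
--     # This function cheks the port correspond to a DAC.
--     # The correspondance is:
--     #
--     # DAC0, tile 0.
--     # s00_axis
--     #
--     # DAC1, tile 0.
--     # s01_axis
--     #
--     # DAC2, tile 0.
--     # s02_axis
--     #
--     # DAC3, tile 0.
--     # s03_axis
--     #
--     # DAC0, tile 1.
--     # s10_axis
--     #
--     # DAC1, tile 1.
--     # s11_axis
--     #
--     # DAC2, tile 1.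
--     # s12_axis
--     #
--     # DAC3, tile 1.
--     # s13_axis
--     #
--     # DAC0, tile 2.
--     # s20_axis
--     #
--     # DAC1, tile 2.
--     # s21_axis
--     #
--     # DAC2, tile 2.
--     # s22_axis
--     #
--     # DAC3, tile 2.
--     # s23_axis
--     #
--     # DAC0, tile 3.
--     # s30_axis
--     #
--     # DAC1, tile 3.
--     # s31_axis
--     #
--     # DAC2, tile 3.
--     # s32_axis
--     #
--     # DAC3, tile 3.
--     # s33_axis
--     #
--     # First value, tile.
--     # Second value, dac.
--     dac_dict =  {
--         '0' :   {
--                     '0' : {'port' : 's00'},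
--                     '1' : {'port' : 's01'},
--                     '2' : {'port' : 's02'},
--                     '3' : {'port' : 's03'},
--                 },
--         '1' :   {
--                     '0' : {'port' : 's10'},
--                     '1' : {'port' : 's11'},
--                     '2' : {'port' : 's12'},
--                     '3' : {'port' : 's13'},
--                 },
--         '2' :   {
--                     '0' : {'port' : 's20'},
--                     '1' : {'port' : 's21'},
--                     '2' : {'port' : 's22'},
--                     '3' : {'port' : 's23'},
--                 },
--         '3' :   {
--                     '0' : {'port' : 's30'},
--                     '1' : {'port' : 's31'},
--                     '2' : {'port' : 's32'},
--                     '3' : {'port' : 's33'},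
--                 },
--                 }
--     p_n = port[0:3]
--
--     # Find adc<->port.
--     for tile in dac_dict.keys():
--         for dac in dac_dict[tile].keys():
--             if p_n == dac_dict[tile][dac]['port']:
--                 return tile,dac
--
--     # If I got here, dac not found.
--     raise RuntimeError("Cannot find correspondance with any DAC for port %s" % (port))
-- ===== SOURCE B (Python) =====
-- def port2dac(port):
--     # Direct parsing: port must start with 's' + tile digit + dac digit.
--     p_n = port[0:3]
--     if len(p_n) == 3 and p_n[0] == 's' and p_n[1] in '0123' and p_n[2] in '0123':
--         return p_n[1], p_n[2]
--     raise RuntimeError("Cannot find correspondance with any DAC for port %s" % (port))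
-- ===== Notes on version B (the rewrite author's own statement) =====
-- stated objective: simpler
-- what changed: Replaced the 16-entry nested dict table and its double loop by direct parsing of the three-character prefix ('s' + tile digit + dac digit).
import Mathlib
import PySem

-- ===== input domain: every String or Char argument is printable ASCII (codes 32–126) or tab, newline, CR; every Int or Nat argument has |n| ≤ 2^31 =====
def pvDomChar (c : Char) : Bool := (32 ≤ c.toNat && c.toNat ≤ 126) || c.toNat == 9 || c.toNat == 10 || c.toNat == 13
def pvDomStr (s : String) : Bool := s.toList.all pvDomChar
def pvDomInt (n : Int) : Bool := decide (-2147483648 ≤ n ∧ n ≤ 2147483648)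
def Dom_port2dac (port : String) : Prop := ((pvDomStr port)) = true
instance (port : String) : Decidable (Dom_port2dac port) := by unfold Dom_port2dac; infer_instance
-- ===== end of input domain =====

-- B replaces A's 16-entry nested dict table and double loop by direct parsing of the
-- three-character prefix; equivalence is about the return value (both raise on the same inputs,
-- which Pre_ excludes).

-- ===== PORT A =====
-- A's table: tile → (dac → port string), in insertion order.
def dacDict : PySem.Dict String (PySem.Dict String String) :=
  PySem.Dict.ofList
  [("0", PySem.Dict.ofList [("0","s00"),("1","s01"),("2","s02"),("3","s03")]),
   ("1", PySem.Dict.ofList [("0","s10"),("1","s11"),("2","s12"),("3","s13")]),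
   ("2", PySem.Dict.ofList [("0","s20"),("1","s21"),("2","s22"),("3","s23")]),
   ("3", PySem.Dict.ofList [("0","s30"),("1","s31"),("2","s32"),("3","s33")])]

-- Nested loop with early return: first (tile, dac) whose table entry equals p_n.
def port2dac (port : String) : String × String :=
  let pn : List Char := PySem.List.slice port.toList (some 0) (some 3)
  match dacDict.items.foldl
      (fun acc (tile, inner) =>
        match acc with
        | some r => some r
        | none =>
          inner.items.foldl
            (fun acc2 (dac, p) =>
              match acc2 with
              | some r => some r
              | none => if pn = p.toList then some (tile, dac) else none)
            none)
      none with
  | some r => r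
  | none => ("", "")   -- Python raises RuntimeError here; excluded by Pre_

-- ===== PORT B =====
def port2dac_alt (port : String) : String × String :=
  let pn : List Char := PySem.List.slice port.toList (some 0) (some 3)
  match pn with
  | [c0, c1, c2] =>
    if c0 = 's' ∧ c1 ∈ ['0','1','2','3'] ∧ c2 ∈ ['0','1','2','3'] then
      (String.ofList [c1], String.ofList [c2])
    else ("", "")     -- Python raises RuntimeError; excluded by Pre_
  | _ => ("", "")     -- Python raises RuntimeError; excluded by Pre_

-- ===== PRECONDITION & SPEC =====
-- Pre_ admits exactly the inputs on which A returns: prefix 's' + tile digit + dac digit (digits 0-3).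
def preB (l : List Char) : Bool :=
  decide (3 ≤ l.length) && (l.headD ' ' == 's')
    && ((l.drop 1).headD ' ' ∈ (['0','1','2','3'] : List Char))
    && ((l.drop 2).headD ' ' ∈ (['0','1','2','3'] : List Char))

def Pre_port2dac (port : String) : Prop := preB port.toList = true

instance (port : String) : Decidable (Pre_port2dac port) := by unfold Pre_port2dac; infer_instance

def pvWitness_port2dac : String := "s13_axis"

def Spec_port2dac (port : String) (out : String × String) : Prop := out = port2dac_alt port
instance (port : String) (out : String × String) : Decidable (Spec_port2dac port out) := by unfold Spec_port2dac; infer_instance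

-- ===== CLAIM (what is proved, stated in full; the proofs are below) =====
def Claim_equal_port2dac : Prop := ∀ (port : String), Dom_port2dac port → Pre_port2dac port → Spec_port2dac port (port2dac port)

-- ===== LEMMAS AND PROOFS =====

lemma slice03_eq_take (l : List Char) :
    PySem.List.slice l (some 0) (some 3) = l.take 3 := by
  simpa using PySem.List.slice_to_natCast l 3

-- ===== VERDICT (by name: the statement is the Claim_ definition above) =====
theorem port2dac_spec : Claim_equal_port2dac := by
  intro port _ hpre
  unfold Spec_port2dac port2dac port2dac_alt
  unfold Pre_port2dac preB at hpre
  rcases h : port.toList with _ | ⟨c0, _ | ⟨c1, _ | ⟨c2, rest⟩⟩⟩ <;>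
    rw [h] at hpre <;> simp at hpre
  obtain ⟨⟨hc0, h1⟩, h2⟩ := hpre
  subst hc0
  rw [slice03_eq_take]
  rcases h1 with rfl|rfl|rfl|rfl <;> rcases h2 with rfl|rfl|rfl|rfl <;> rfl
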